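-- pv_equiv track=rewrite | github.com/BenWarwick-Champion/adventofcode | 2021/python-solutions/src/day17.py | find_xv_limit
-- ===== SOURCE A (Python) =====
-- def find_xv_limit(target_x):
--   x, lower_xv, upper_xv = 0, 0, 0
--   while x < target_x[0]:
--     lower_xv += 1
--     x = (lower_xv * (lower_xv + 1)) // 2
--   upper_xv = lower_xv
--   while x <= target_x[1]:
--     upper_xv += 1
--     x = (upper_xv * (upper_xv + 1)) // 2
--   return lower_xv, upper_xv
-- ===== SOURCE B (Python) =====
-- def find_xv_limit(target_x):
--     t0, t1 = target_x[0], target_x[1]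
--
--     def least(lo, b):
--         # smallest k >= lo with k*(k+1)//2 > b: doubling search for an upper
--         # bound, then integer binary search
--         hi = lo + 1
--         while hi * (hi + 1) // 2 <= b:
--             hi *= 2
--         while lo < hi:
--             mid = (lo + hi) // 2
--             if mid * (mid + 1) // 2 > b:
--                 hi = mid
--             else:
--                 lo = mid + 1
--         return lo
--
--     lower = least(0, t0 - 1)
--     upper = least(lower, t1)
--     return lower, upper
-- ===== Notes on version B (the rewrite author's own statement) =====
-- stated objective: alternative
-- what changed: Replaces the two unit-step while-loops that walk x through successive triangular numbers with a doubling-plus-binary search for the least k with k*(k+1)//2 > bound.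
import Mathlib
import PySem

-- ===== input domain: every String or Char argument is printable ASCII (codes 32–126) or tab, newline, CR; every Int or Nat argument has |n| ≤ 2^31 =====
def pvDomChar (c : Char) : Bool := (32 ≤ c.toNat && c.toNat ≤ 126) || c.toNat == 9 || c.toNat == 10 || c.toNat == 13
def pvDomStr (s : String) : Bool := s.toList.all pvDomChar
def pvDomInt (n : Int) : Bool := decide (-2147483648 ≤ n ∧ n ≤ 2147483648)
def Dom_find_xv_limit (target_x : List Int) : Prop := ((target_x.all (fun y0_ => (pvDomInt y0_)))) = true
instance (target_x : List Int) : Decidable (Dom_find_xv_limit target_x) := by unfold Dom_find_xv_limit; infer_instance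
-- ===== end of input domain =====

-- B replaces A's unit-step walks through triangular numbers by a doubling + binary search over the same threshold (objective: alternative).

-- ===== PORT A =====
-- tri k = k*(k+1)//2, the triangular-number expression both Python loops assign to x
def triA (k : Nat) : Int := PySem.Int.floordiv ((k : Int) * ((k : Int) + 1)) 2

-- facts cited by name in the termination arguments of the loop ports below
theorem pv_tri_aux : (k : Nat) → k * 2 ≤ k * (k + 1)
  | 0 => Nat.zero_le _
  | (k + 1) => Nat.mul_le_mul_left (k + 1) (Nat.succ_le_succ (Nat.succ_le_succ (Nat.zero_le k)))

theorem pv_cast_tri (k : Nat) : ((k : Int) * ((k : Int) + 1)) = ((k * (k + 1) : Nat) : Int) := by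
  rw [Nat.cast_mul, Nat.cast_add, Nat.cast_one]

theorem pv_tri_ge (k : Nat) : (k : Int) ≤ triA k := by
  unfold triA
  rw [pv_cast_tri, show ((2 : Int)) = ((2 : Nat) : Int) from rfl, PySem.Int.floordiv_natCast]
  exact Int.ofNat_le.mpr ((Nat.le_div_iff_mul_le Nat.zero_lt_two).mpr (pv_tri_aux k))

theorem pv_decA1 (t0 : Int) (lower : Nat) (h : triA lower < t0) :
    (t0 - (↑(lower + 1) : Int)).toNat < (t0 - (lower : Int)).toNat := by
  have h1 : (lower : Int) < t0 := lt_of_le_of_lt (pv_tri_ge lower) h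
  have h2 : t0 - (↑(lower + 1) : Int) < t0 - (lower : Int) := by
    rw [Nat.cast_add, Nat.cast_one]
    exact sub_lt_sub_left (lt_add_one _) t0
  exact (Int.toNat_lt_toNat (sub_pos.mpr h1)).mpr h2

theorem pv_decA2 (t1 : Int) (upper : Nat) (h : triA upper ≤ t1) :
    (t1 + 1 - (↑(upper + 1) : Int)).toNat < (t1 + 1 - (upper : Int)).toNat := by
  have h1 : (upper : Int) < t1 + 1 := lt_of_le_of_lt (le_trans (pv_tri_ge upper) h) (lt_add_one t1)
  have h2 : t1 + 1 - (↑(upper + 1) : Int) < t1 + 1 - (upper : Int) := by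
    rw [Nat.cast_add, Nat.cast_one]
    exact sub_lt_sub_left (lt_add_one _) (t1 + 1)
  exact (Int.toNat_lt_toNat (sub_pos.mpr h1)).mpr h2

theorem pv_decG (b : Int) (hi : Nat) (h1 : 1 ≤ hi) (h2 : triA hi ≤ b) :
    (b + 1 - (↑(hi * 2) : Int)).toNat < (b + 1 - (hi : Int)).toNat := by
  have hb : (hi : Int) < b + 1 := lt_of_le_of_lt (le_trans (pv_tri_ge hi) h2) (lt_add_one b)
  have hlt : hi < hi * 2 := by rw [Nat.mul_two]; exact Nat.lt_add_of_pos_right h1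
  have h3 : b + 1 - (↑(hi * 2) : Int) < b + 1 - (hi : Int) :=
    sub_lt_sub_left (Nat.cast_lt.mpr hlt) (b + 1)
  exact (Int.toNat_lt_toNat (sub_pos.mpr hb)).mpr h3

theorem pv_decB1 (lo hi : Nat) (h : lo < hi) : (lo + hi) / 2 - lo < hi - lo := by
  have hlo : lo ≤ (lo + hi) / 2 :=
    (Nat.le_div_iff_mul_le Nat.zero_lt_two).mpr (by rw [Nat.mul_two]; exact Nat.add_le_add_left (Nat.le_of_lt h) lo)
  have hhi : (lo + hi) / 2 < hi :=
    Nat.div_lt_of_lt_mul (by rw [Nat.two_mul]; exact Nat.add_lt_add_right h hi)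
  exact Nat.sub_lt_sub_right hlo hhi

theorem pv_decB2 (lo hi : Nat) (h : lo < hi) : hi - ((lo + hi) / 2 + 1) < hi - lo := by
  have hlo : lo ≤ (lo + hi) / 2 :=
    (Nat.le_div_iff_mul_le Nat.zero_lt_two).mpr (by rw [Nat.mul_two]; exact Nat.add_le_add_left (Nat.le_of_lt h) lo)
  exact Nat.sub_lt_sub_left h (Nat.lt_succ_of_le hlo)

-- first while loop: while x < target_x[0]: lower_xv += 1; x = tri lower_xv.
-- x is always tri of the counter (initially x = 0 = tri 0), so it is carried implicitly.
def loopA1 (t0 : Int) (lower : Nat) : Nat :=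
  if h : triA lower < t0 then loopA1 t0 (lower + 1) else lower
termination_by (t0 - lower).toNat
decreasing_by exact pv_decA1 t0 lower h

-- second while loop: while x <= target_x[1]: upper_xv += 1; x = tri upper_xv.
def loopA2 (t1 : Int) (upper : Nat) : Nat :=
  if h : triA upper ≤ t1 then loopA2 t1 (upper + 1) else upper
termination_by (t1 + 1 - upper).toNat
decreasing_by exact pv_decA2 t1 upper h

def find_xv_limit (target_x : List Int) : List Int :=
  match PySem.List.pyGet? target_x 0, PySem.List.pyGet? target_x 1 with
  | some t0, some t1 =>
      let lower := loopA1 t0 0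
      let upper := loopA2 t1 lower
      [(lower : Int), (upper : Int)]
  | _, _ => []  -- IndexError in Python; excluded by Pre_

-- ===== PORT B =====
def triB (k : Nat) : Int := PySem.Int.floordiv ((k : Int) * ((k : Int) + 1)) 2

-- doubling phase: while hi*(hi+1)//2 <= b: hi *= 2.  The '1 ≤ hi' conjunct only
-- makes the recursion total; every call site has hi = lo+1 ≥ 1, where it is true.
def growB (b : Int) (hi : Nat) : Nat :=
  if h : 1 ≤ hi ∧ triB hi ≤ b then growB b (hi * 2) else hi
termination_by (b + 1 - hi).toNat
decreasing_by exact pv_decG b hi h.1 h.2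

-- binary-search phase: while lo < hi: mid = (lo+hi)//2; …
def bisectB (b : Int) (lo hi : Nat) : Nat :=
  if h : lo < hi then
    let mid := (lo + hi) / 2
    if triB mid > b then bisectB b lo mid else bisectB b (mid + 1) hi
  else lo
termination_by hi - lo
decreasing_by
  · exact pv_decB1 lo hi h
  · exact pv_decB2 lo hi h

-- least(lo, b): smallest k ≥ lo with k*(k+1)//2 > b
def leastB (lo : Nat) (b : Int) : Nat :=
  bisectB b lo (growB b (lo + 1))

def find_xv_limit_alt (target_x : List Int) : List Int :=
  match PySem.List.pyGet? target_x 0 with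
  | none => []  -- IndexError in Python; excluded by Pre_
  | some t0 =>
    match PySem.List.pyGet? target_x 1 with
    | none => []  -- IndexError in Python; excluded by Pre_
    | some t1 =>
      let lower := leastB 0 (t0 - 1)
      let upper := leastB lower t1
      [(lower : Int), (upper : Int)]

-- ===== PRECONDITION & SPEC =====
-- A raises IndexError (target_x[0] or target_x[1]) when the list has fewer than two elements.
def Pre_find_xv_limit (target_x : List Int) : Prop := 2 ≤ target_x.length
instance (target_x : List Int) : Decidable (Pre_find_xv_limit target_x) := by unfold Pre_find_xv_limit; infer_instance
def pvWitness_find_xv_limit : List Int := [5, 10]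

def Spec_find_xv_limit (target_x : List Int) (out : List Int) : Prop := out = find_xv_limit_alt target_x
instance (target_x : List Int) (out : List Int) : Decidable (Spec_find_xv_limit target_x out) := by unfold Spec_find_xv_limit; infer_instance

-- ===== CLAIM (what is proved, stated in full; the proofs are below) =====
def Claim_equal_find_xv_limit : Prop := ∀ (target_x : List Int), Dom_find_xv_limit target_x → Pre_find_xv_limit target_x → Spec_find_xv_limit target_x (find_xv_limit target_x)

-- ===== LEMMAS AND PROOFS =====

theorem tri_eq (k : Nat) : triA k = ((k * (k + 1) / 2 : Nat) : Int) := by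
  unfold triA
  rw [pv_cast_tri, show ((2 : Int)) = ((2 : Nat) : Int) from rfl, PySem.Int.floordiv_natCast]

theorem triB_eq_triA (k : Nat) : triB k = triA k := rfl

theorem tri_mono {k m : Nat} (h : k ≤ m) : triA k ≤ triA m := by
  rw [tri_eq, tri_eq]
  have : k * (k + 1) / 2 ≤ m * (m + 1) / 2 :=
    Nat.div_le_div_right (Nat.mul_le_mul h (by omega))
  exact_mod_cast this

-- characterisation of loopA2: least k ≥ s with b < tri k
theorem loopA2_spec (b : Int) (s : Nat) :
    s ≤ loopA2 b s ∧ b < triA (loopA2 b s) ∧ ∀ k, s ≤ k → k < loopA2 b s → triA k ≤ b := by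
  fun_induction loopA2 b s with
  | case1 s h ih =>
    obtain ⟨ih1, ih2, ih3⟩ := ih
    refine ⟨by omega, ih2, ?_⟩
    intro k hk1 hk2
    rcases Nat.eq_or_lt_of_le hk1 with rfl | hlt
    · exact h
    · exact ih3 k hlt hk2
  | case2 s h => exact ⟨le_refl _, by omega, fun k hk1 hk2 => by omega⟩

theorem loopA1_eq (t0 : Int) (s : Nat) : loopA1 t0 s = loopA2 (t0 - 1) s := by
  fun_induction loopA1 t0 s with
  | case1 s h ih =>
    conv_rhs => rw [loopA2]
    rw [dif_pos (by omega)]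
    exact ih
  | case2 s h =>
    conv_rhs => rw [loopA2]
    rw [dif_neg (by omega)]

theorem growB_spec (b : Int) (hi : Nat) (h1 : 1 ≤ hi) :
    hi ≤ growB b hi ∧ b < triA (growB b hi) := by
  fun_induction growB b hi with
  | case1 hi h ih =>
    obtain ⟨hh1, hh2⟩ := h
    obtain ⟨ih1, ih2⟩ := ih (by omega)
    exact ⟨by omega, ih2⟩
  | case2 hi h =>
    refine ⟨le_refl _, ?_⟩
    by_cases hc : triB hi ≤ b
    · exact absurd ⟨h1, hc⟩ h
    · exact lt_of_not_ge hc

theorem bisectB_spec (b : Int) (lo hi : Nat) (hle : lo ≤ hi) (hhi : b < triA hi) :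
    lo ≤ bisectB b lo hi ∧ bisectB b lo hi ≤ hi ∧ b < triA (bisectB b lo hi) ∧
      ∀ k, lo ≤ k → k < bisectB b lo hi → triA k ≤ b := by
  fun_induction bisectB b lo hi with
  | case1 lo hi h mid hmid ih =>
    rw [triB_eq_triA] at hmid
    obtain ⟨i1, i2, i3, i4⟩ := ih (by omega) hmid
    exact ⟨i1, by omega, i3, i4⟩
  | case2 lo hi h mid hmid ih =>
    rw [triB_eq_triA, gt_iff_lt, not_lt] at hmid
    obtain ⟨i1, i2, i3, i4⟩ := ih (by omega) hhi
    refine ⟨by omega, i2, i3, ?_⟩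
    intro k hk1 hk2
    by_cases hk3 : mid + 1 ≤ k
    · exact i4 k hk3 hk2
    · exact le_trans (tri_mono (by omega)) hmid
  | case3 lo hi h =>
    have hlo : lo = hi := by omega
    subst hlo
    exact ⟨le_refl _, le_refl _, hhi, fun k hk1 hk2 => by omega⟩

theorem leastB_spec (lo : Nat) (b : Int) :
    lo ≤ leastB lo b ∧ b < triA (leastB lo b) ∧ ∀ k, lo ≤ k → k < leastB lo b → triA k ≤ b := by
  unfold leastB
  obtain ⟨g1, g2⟩ := growB_spec b (lo + 1) (by omega)
  obtain ⟨i1, i2, i3, i4⟩ := bisectB_spec b lo (growB b (lo + 1)) (by omega) g2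
  exact ⟨i1, i3, i4⟩

theorem loopA2_eq_leastB (b : Int) (s : Nat) : loopA2 b s = leastB s b := by
  obtain ⟨a1, a2, a3⟩ := loopA2_spec b s
  obtain ⟨b1, b2, b3⟩ := leastB_spec s b
  rcases Nat.lt_trichotomy (loopA2 b s) (leastB s b) with h | h | h
  · exact absurd (b3 _ a1 h) (by omega)
  · exact h
  · exact absurd (a3 _ b1 h) (by omega)

-- ===== VERDICT (by name: the statement is the Claim_ definition above) =====
theorem find_xv_limit_spec : Claim_equal_find_xv_limit := by
  intro target_x _ hpre
  unfold Spec_find_xv_limit find_xv_limit find_xv_limit_alt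
  match target_x, hpre with
  | a :: b :: rest, _ =>
    have h0 : PySem.List.pyGet? (a :: b :: rest) 0 = some a := by
      simp [PySem.List.pyGet?, PySem.List.pyIdx?,
        show (0:Int) ≤ (rest.length:Int) + 1 from by omega]
    have h1 : PySem.List.pyGet? (a :: b :: rest) 1 = some b := by
      simp [PySem.List.pyGet?, PySem.List.pyIdx?]
    rw [h0, h1]
    simp only []
    rw [loopA1_eq, loopA2_eq_leastB, loopA2_eq_leastB]
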